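-- pv_equiv track=rewrite | github.com/akhilkumarreddykothamiddhi/Ai-analyst | app.py | build_date_type_hints
-- ===== SOURCE A (Python) =====
-- def build_date_type_hints(schema_dict: dict) -> str:
--     native_date, native_ts, num_date = [], [], []
--     for tbl, cols in schema_dict.items():
--         for col, dtype in cols.items():
--             base = dtype.split("(")[0]
--             if base == "DATE":
--                 native_date.append(f"{tbl}.{col}")
--             elif base in ("TIMESTAMP_NTZ","TIMESTAMP_LTZ","TIMESTAMP_TZ","TIMESTAMP","DATETIME"):
--                 native_ts.append(f"{tbl}.{col}")
--             elif base in ("NUMBER","NUMERIC","INTEGER","INT","BIGINT","FLOAT","DOUBLE"):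
--                 if any(k in col.lower() for k in ["date","time","dt","day","month","year","_at","_on"]):
--                     num_date.append(f"{tbl}.{col}")
--     lines = ["⛔ DATE COLUMN TYPES"]
--     if native_date:
--         lines.append("✅ NATIVE DATE — use directly, never wrap in TO_DATE:")
--         lines += [f"   • {c}" for c in native_date]
--     if native_ts:
--         lines.append("✅ NATIVE TIMESTAMP — use CAST(col AS DATE):")
--         lines += [f"   • {c}" for c in native_ts]
--     if num_date:
--         lines.append("⚠️  NUMERIC date cols — use TO_DATE(LPAD(CAST(col AS VARCHAR),8,'0'),'YYYYMMDD'):")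
--         lines += [f"   • {c}" for c in num_date]
--     return "\n".join(lines)
-- ===== SOURCE B (Python) =====
-- TS_TYPES = ("TIMESTAMP_NTZ", "TIMESTAMP_LTZ", "TIMESTAMP_TZ", "TIMESTAMP", "DATETIME")
-- NUM_TYPES = ("NUMBER", "NUMERIC", "INTEGER", "INT", "BIGINT", "FLOAT", "DOUBLE")
-- KEYWORDS = ("date", "time", "dt", "day", "month", "year", "_at", "_on")
--
--
-- def _base(dtype: str) -> str:
--     return dtype.split("(")[0]
--
--
-- def build_date_type_hints(schema_dict: dict) -> str:
--     entries = [(tbl, col, dtype)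
--                for tbl, cols in schema_dict.items()
--                for col, dtype in cols.items()]
--     native_date = [f"{tbl}.{col}" for tbl, col, dtype in entries
--                    if _base(dtype) == "DATE"]
--     native_ts = [f"{tbl}.{col}" for tbl, col, dtype in entries
--                  if _base(dtype) in TS_TYPES]
--     num_date = [f"{tbl}.{col}" for tbl, col, dtype in entries
--                 if _base(dtype) in NUM_TYPES
--                 and any(k in col.lower() for k in KEYWORDS)]
--     sections = [
--         ("✅ NATIVE DATE — use directly, never wrap in TO_DATE:", native_date),
--         ("✅ NATIVE TIMESTAMP — use CAST(col AS DATE):", native_ts),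
--         ("⚠️  NUMERIC date cols — use TO_DATE(LPAD(CAST(col AS VARCHAR),8,'0'),'YYYYMMDD'):", num_date),
--     ]
--     lines = ["⛔ DATE COLUMN TYPES"]
--     for header, items in sections:
--         if items:
--             lines.append(header)
--             lines.extend(f"   • {c}" for c in items)
--     return "\n".join(lines)
-- ===== Notes on version B (the rewrite author's own statement) =====
-- stated objective: alternative
-- what changed: Replaces A's single pass that pushes into three accumulator lists inside an if/elif chain by a flatten-then-filter decomposition: a flat (table, column, dtype) entry list is built once and the three buckets are computed by independent filtering comprehensions, and the output is assembled by folding over a (header, items) section table instead of three hand-written if blocks.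
import Mathlib
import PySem

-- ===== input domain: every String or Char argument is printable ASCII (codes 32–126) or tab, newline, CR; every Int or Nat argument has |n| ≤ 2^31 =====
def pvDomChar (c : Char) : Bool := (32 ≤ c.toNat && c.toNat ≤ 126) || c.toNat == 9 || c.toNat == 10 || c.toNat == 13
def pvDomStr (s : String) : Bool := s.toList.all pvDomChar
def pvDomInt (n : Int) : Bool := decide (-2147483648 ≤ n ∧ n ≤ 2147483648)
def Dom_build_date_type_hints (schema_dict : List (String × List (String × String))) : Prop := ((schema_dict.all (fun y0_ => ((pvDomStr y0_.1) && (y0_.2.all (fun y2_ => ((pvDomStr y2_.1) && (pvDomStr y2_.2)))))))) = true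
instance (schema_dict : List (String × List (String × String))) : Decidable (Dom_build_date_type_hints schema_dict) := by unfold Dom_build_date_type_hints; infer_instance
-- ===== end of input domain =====

-- B replaces A's single if/elif accumulation pass by a flatten-then-filter decomposition with a section-table
-- assembly (objective: alternative, same cost).

-- ===== PORT A =====
-- A-side helpers: the literal tuples and the dtype.split("(")[0] computation of A's loop body.
def pvTsNamesA : List String := ["TIMESTAMP_NTZ", "TIMESTAMP_LTZ", "TIMESTAMP_TZ", "TIMESTAMP", "DATETIME"]
def pvNumNamesA : List String := ["NUMBER", "NUMERIC", "INTEGER", "INT", "BIGINT", "FLOAT", "DOUBLE"]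
def pvKwA : List String := ["date", "time", "dt", "day", "month", "year", "_at", "_on"]
-- dtype.split("(")[0] : split with a non-empty sep always returns some nonempty list, so getD/headD never fire
def pvBaseA (dtype : String) : String := ((PySem.Str.split? dtype "(").getD []).headD ""
-- A's loop body: update the three accumulator lists for one (tbl, col, dtype)
def pvStepA (acc : List String × List String × List String) (tbl col dtype : String) :
    List String × List String × List String :=
  let base := pvBaseA dtype
  if base == "DATE" then (acc.1 ++ [tbl ++ "." ++ col], acc.2.1, acc.2.2)
  else if pvTsNamesA.contains base then (acc.1, acc.2.1 ++ [tbl ++ "." ++ col], acc.2.2)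
  else if pvNumNamesA.contains base && pvKwA.any (fun k => PySem.Str.isIn k (PySem.Str.lower col)) then
    (acc.1, acc.2.1, acc.2.2 ++ [tbl ++ "." ++ col])
  else acc

def build_date_type_hints (schema_dict : List (String × List (String × String))) : String :=
  let r := schema_dict.foldl
    (fun acc p => p.2.foldl (fun a q => pvStepA a p.1 q.1 q.2) acc) ([], [], [])
  let lines : List String := ["⛔ DATE COLUMN TYPES"]
  let lines := if r.1.isEmpty then lines else
    lines ++ ["✅ NATIVE DATE — use directly, never wrap in TO_DATE:"] ++ r.1.map (fun c => "   • " ++ c)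
  let lines := if r.2.1.isEmpty then lines else
    lines ++ ["✅ NATIVE TIMESTAMP — use CAST(col AS DATE):"] ++ r.2.1.map (fun c => "   • " ++ c)
  let lines := if r.2.2.isEmpty then lines else
    lines ++ ["⚠️  NUMERIC date cols — use TO_DATE(LPAD(CAST(col AS VARCHAR),8,'0'),'YYYYMMDD'):"] ++ r.2.2.map (fun c => "   • " ++ c)
  PySem.Str.join "\n" lines

-- ===== PORT B =====
-- B-side helper: Source B's keyword test (the type/keyword constants are the shared literals above).
def pvHasKwB (col : String) : Bool := pvKwA.any (fun k => PySem.Str.isIn k (PySem.Str.lower col))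

def build_date_type_hints_alt (schema_dict : List (String × List (String × String))) : String :=
  let entries := schema_dict.flatMap (fun p => p.2.map (fun q => (p.1, q.1, q.2)))
  let native_date := (entries.filter (fun e => pvBaseA e.2.2 == "DATE")).map (fun e => e.1 ++ "." ++ e.2.1)
  let native_ts := (entries.filter (fun e => pvTsNamesA.contains (pvBaseA e.2.2))).map (fun e => e.1 ++ "." ++ e.2.1)
  let num_date := (entries.filter (fun e => pvNumNamesA.contains (pvBaseA e.2.2) && pvHasKwB e.2.1)).map (fun e => e.1 ++ "." ++ e.2.1)
  let sections : List (String × List String) :=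
    [("✅ NATIVE DATE — use directly, never wrap in TO_DATE:", native_date),
     ("✅ NATIVE TIMESTAMP — use CAST(col AS DATE):", native_ts),
     ("⚠️  NUMERIC date cols — use TO_DATE(LPAD(CAST(col AS VARCHAR),8,'0'),'YYYYMMDD'):", num_date)]
  let lines := sections.foldl
    (fun ls s => if s.2.isEmpty then ls else ls ++ [s.1] ++ s.2.map (fun c => "   • " ++ c))
    ["⛔ DATE COLUMN TYPES"]
  PySem.Str.join "\n" lines

-- ===== PRECONDITION & SPEC =====
def Spec_build_date_type_hints (schema_dict : List (String × List (String × String))) (out : String) : Prop := out = build_date_type_hints_alt schema_dict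
instance (schema_dict : List (String × List (String × String))) (out : String) : Decidable (Spec_build_date_type_hints schema_dict out) := by unfold Spec_build_date_type_hints; infer_instance

-- ===== CLAIM (what is proved, stated in full; the proofs are below) =====
def Claim_equal_build_date_type_hints : Prop := ∀ (schema_dict : List (String × List (String × String))), Dom_build_date_type_hints schema_dict → Spec_build_date_type_hints schema_dict (build_date_type_hints schema_dict)

-- ===== LEMMAS AND PROOFS =====

-- A's step expressed on a flat (tbl, col, dtype) entry
def pvStepE (acc : List String × List String × List String) (e : String × String × String) :
    List String × List String × List String := pvStepA acc e.1 e.2.1 e.2.2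

-- A's nested fold is the fold of pvStepE over the flattened entry list
theorem pvFlattenA (sd : List (String × List (String × String)))
    (acc : List String × List String × List String) :
    sd.foldl (fun acc p => p.2.foldl (fun a q => pvStepA a p.1 q.1 q.2) acc) acc
      = (sd.flatMap (fun p => p.2.map (fun q => (p.1, q.1, q.2)))).foldl pvStepE acc := by
  induction sd generalizing acc with
  | nil => rfl
  | cons p sd ih =>
    simp only [List.foldl_cons, List.flatMap_cons, List.foldl_append, List.foldl_map, ih, pvStepE]

theorem pv_ts_not_num (b : String) (h : pvTsNamesA.contains b = true) : pvNumNamesA.contains b = false := by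
  simp [pvTsNamesA] at h
  rcases h with rfl | rfl | rfl | rfl | rfl <;> decide

-- the fold over the flat entries computes exactly the three independent filter passes
theorem pvBucket (es : List (String × String × String))
    (acc : List String × List String × List String) :
    es.foldl pvStepE acc
      = (acc.1 ++ (es.filter (fun e => pvBaseA e.2.2 == "DATE")).map (fun e => e.1 ++ "." ++ e.2.1),
         acc.2.1 ++ (es.filter (fun e => pvTsNamesA.contains (pvBaseA e.2.2))).map (fun e => e.1 ++ "." ++ e.2.1),
         acc.2.2 ++ (es.filter (fun e => pvNumNamesA.contains (pvBaseA e.2.2)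
            && pvKwA.any (fun k => PySem.Str.isIn k (PySem.Str.lower e.2.1)))).map (fun e => e.1 ++ "." ++ e.2.1)) := by
  induction es generalizing acc with
  | nil => simp
  | cons e es ih =>
    rw [List.foldl_cons, ih]
    by_cases h1 : (pvBaseA e.2.2 == "DATE") = true
    · have hb : pvBaseA e.2.2 = "DATE" := by simpa using h1
      simp [pvStepE, pvStepA, hb, pvTsNamesA, pvNumNamesA]
    · by_cases h2 : pvTsNamesA.contains (pvBaseA e.2.2) = true
      · have h4 := pv_ts_not_num _ h2
        simp only [List.contains_eq_mem, decide_eq_true_eq, decide_eq_false_iff_not] at h2 h4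
        simp [pvStepE, pvStepA, h1, h2, h4]
      · by_cases h3 : (pvNumNamesA.contains (pvBaseA e.2.2)
            && pvKwA.any (fun k => PySem.Str.isIn k (PySem.Str.lower e.2.1))) = true
        · simp only [Bool.not_eq_true, List.contains_eq_mem, decide_eq_false_iff_not] at h2
          simp at h3
          simp [pvStepE, pvStepA, h1, h2, h3]
        · simp only [Bool.not_eq_true, List.contains_eq_mem, decide_eq_false_iff_not] at h2
          have h3' : (pvNumNamesA.contains (pvBaseA e.2.2)
              && pvKwA.any (fun k => PySem.Str.isIn k (PySem.Str.lower e.2.1))) = false :=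
            Bool.eq_false_iff.mpr h3
          have hc : ¬(pvBaseA e.2.2 ∈ pvNumNamesA ∧
              ∃ x ∈ pvKwA, PySem.Chars.isIn x.toList (PySem.Chars.lower e.2.1.toList) = true) := by
            simpa using h3'
          simp [pvStepE, pvStepA, h1, h2, hc]

-- ===== VERDICT (by name: the statement is the Claim_ definition above) =====
theorem build_date_type_hints_spec : Claim_equal_build_date_type_hints := by
  intro sd _
  unfold Spec_build_date_type_hints build_date_type_hints build_date_type_hints_alt
  simp only [pvFlattenA, pvBucket, List.nil_append, pvHasKwB, List.foldl_cons, List.foldl_nil]
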